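-- pv_equiv track=rewrite | github.com/rputman0/HangmanPractice | HangMan.py | convertToDashes
-- ===== SOURCE A (Python) =====
-- def convertToDashes(word):
--     dashes = ""
--     for i in range(len(word)):
--         if(isSpecialCharacter(word[i])):
--             dashes += word[i]
--         else:
--             dashes += "-"
--
--     return dashes
--
-- def isSpecialCharacter(letter):
--     isSpecial = False
--     specialCharacters = " '!.,/&[]():0123456789"
--     for i in range(len(specialCharacters)):
--         if(specialCharacters[i] == letter):
--             isSpecial = True
--             break
--
--     return isSpecial
-- ===== SOURCE B (Python) =====
-- import re
--
-- _SPECIALS = re.compile(r"[^ '!.,/&\[\]():0-9]")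
--
-- def convertToDashes(word):
--     return _SPECIALS.sub("-", word)
-- ===== Notes on version B (the rewrite author's own statement) =====
-- stated objective: idiomatic
-- what changed: Replaces the index loop with a per-character helper that scans the special string by a single precompiled regex substitution replacing every character outside the special class with a dash.
import Mathlib
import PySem

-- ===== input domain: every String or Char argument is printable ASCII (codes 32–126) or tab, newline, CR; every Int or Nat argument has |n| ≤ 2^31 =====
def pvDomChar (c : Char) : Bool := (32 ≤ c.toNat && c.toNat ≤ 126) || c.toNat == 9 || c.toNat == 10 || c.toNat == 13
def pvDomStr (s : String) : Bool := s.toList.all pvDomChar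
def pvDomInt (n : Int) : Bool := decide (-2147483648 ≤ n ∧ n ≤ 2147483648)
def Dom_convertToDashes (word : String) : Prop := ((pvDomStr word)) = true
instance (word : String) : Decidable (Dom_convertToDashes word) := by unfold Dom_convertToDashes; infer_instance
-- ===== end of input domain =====

-- ===== PORT A =====
-- B changes: one precompiled regex substitution instead of an index loop with a per-char scan (idiomatic); return value only.
def pvSpecials : List Char := " '!.,/&[]():0123456789".toList

-- A's isSpecialCharacter: linear scan with break over specialCharacters
def pvScan : List Char → Char → Bool
  | [], _ => false
  | c :: rest, letter => if c == letter then true else pvScan rest letter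

def isSpecialCharacter (letter : Char) : Bool := pvScan pvSpecials letter

-- A's loop: dashes accumulator, +=
def pvLoopA : List Char → List Char → List Char
  | [], dashes => dashes
  | c :: rest, dashes =>
      pvLoopA rest (dashes ++ [if isSpecialCharacter c then c else '-'])

def convertToDashes (word : String) : String :=
  String.ofList (pvLoopA word.toList [])

-- ===== PORT B =====
-- the regex character class [^ '!.,/&\[\]():0-9]: literals plus the digit range
def pvAltClass : List Char :=
  " '!.,/&[]():".toList ++ (List.range 10).map (fun d => Char.ofNat ('0'.toNat + d))

-- re.sub of that class with "-" = replace every char outside the class by '-' (exact: one pass over the chars)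
def convertToDashes_alt (word : String) : String :=
  String.ofList (word.toList.map (fun c => if pvAltClass.contains c then c else '-'))

-- ===== PRECONDITION & SPEC =====
def Spec_convertToDashes (word : String) (out : String) : Prop := out = convertToDashes_alt word
instance (word : String) (out : String) : Decidable (Spec_convertToDashes word out) := by unfold Spec_convertToDashes; infer_instance

-- ===== CLAIM (what is proved, stated in full; the proofs are below) =====
def Claim_equal_convertToDashes : Prop := ∀ (word : String), Dom_convertToDashes word → Spec_convertToDashes word (convertToDashes word)

-- ===== LEMMAS AND PROOFS =====

-- ===== VERDICT (by name: the statement is the Claim_ definition above) =====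
lemma pvScan_contains (l : List Char) (c : Char) : pvScan l c = l.contains c := by
  induction l with
  | nil => rfl
  | cons a t ih =>
      by_cases h : c = a
      · subst h; simp [pvScan]
      · simp [pvScan, ih, Ne.symm h, h]

lemma pvClass_eq : pvSpecials = pvAltClass := by decide

lemma pvLoopA_map (l acc : List Char) :
    pvLoopA l acc = acc ++ l.map (fun c => if isSpecialCharacter c then c else '-') := by
  induction l generalizing acc with
  | nil => simp [pvLoopA]
  | cons c t ih => simp [pvLoopA, ih]

theorem convertToDashes_spec : Claim_equal_convertToDashes := by
  intro word _
  unfold Spec_convertToDashes convertToDashes convertToDashes_alt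
  rw [pvLoopA_map]
  simp only [List.nil_append]
  congr 1
  apply List.map_congr_left
  intro c _
  simp [isSpecialCharacter, pvScan_contains, pvClass_eq]
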